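-- pv_equiv track=rewrite | github.com/Bigtoxa766/goit-pnc-hw-13 | vigeneer_cipher.py | extend_key
-- ===== SOURCE A (Python) =====
-- def extend_key(text, key):
--     key = list(key)
--     # Якщо довжина ключа меньша за текст, циклічно повторюємо його
--     if len(text) == len(key):
--         return key
--     else:
--         for i in range(len(text) - len(key)):
--             key.append(key[i % len(key)])
--
--     return ''.join(key)
-- ===== SOURCE B (Python) =====
-- def extend_key(text, key):
--     if len(text) < len(key):
--         return key
--     reps = -(-len(text) // len(key))   # ceiling division; ZeroDivisionError on empty key, like A
--     return (key * reps)[:len(text)]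
-- ===== Notes on version B (the rewrite author's own statement) =====
-- stated objective: simpler
-- what changed: Replaces the element-by-element append loop (reading back from the growing list) by one ceiling-division repetition count, building key*reps and slicing it to len(text).
-- outside the precondition, e.g. on extend_key('ab', 'cd'): A returns ['c', 'd'], B returns 'cd'; on extend_key('', ''): A returns [], B raises ZeroDivisionError
import Mathlib
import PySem

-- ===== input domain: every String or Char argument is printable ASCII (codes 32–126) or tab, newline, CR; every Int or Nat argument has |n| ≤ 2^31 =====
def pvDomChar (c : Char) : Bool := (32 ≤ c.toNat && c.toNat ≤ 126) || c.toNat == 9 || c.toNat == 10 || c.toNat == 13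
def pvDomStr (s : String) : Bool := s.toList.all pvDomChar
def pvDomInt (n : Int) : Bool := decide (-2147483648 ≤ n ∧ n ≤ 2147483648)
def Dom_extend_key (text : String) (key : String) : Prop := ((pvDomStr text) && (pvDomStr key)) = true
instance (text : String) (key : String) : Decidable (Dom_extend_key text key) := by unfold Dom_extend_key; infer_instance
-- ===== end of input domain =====

-- B replaces A's one-char-at-a-time append loop by a ceiling-division repetition count (key * reps sliced to len(text)); objective: simpler.

-- ===== PORT A =====
-- Python returns the LIST of chars when the lengths are equal (not a string) and raises
-- ZeroDivisionError for an empty key with longer text; both cases are excluded by Pre_.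
-- '.getD ' '' below: pyGet? is none only when the key is empty (the excluded ZeroDivisionError case).
def extend_key (text : String) (key : String) : String :=
  let key0 := key.toList
  if text.length = key0.length then String.ofList key0
  else
    String.ofList ((PySem.List.pyRange 0 ((text.length : Int) - (key0.length : Int)) 1).foldl
      (fun k i => k ++ [((PySem.List.pyGet? k (PySem.Int.mod i (k.length : Int))).getD ' ')]) key0)

-- ===== PORT B =====
def extend_key_alt (text : String) (key : String) : String :=
  if text.length < key.length then key
  else
    let reps : Int := -(PySem.Int.floordiv (-(text.length : Int)) (key.length : Int))
    String.ofList ((List.replicate reps.toNat key.toList).flatten.take text.length)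

-- ===== PRECONDITION & SPEC =====
-- Pre_ excludes inputs where len(text)==len(key) (A returns a list of characters, not a string —
-- not a value of the declared type) and the empty key with text of a different length
-- (A raises ZeroDivisionError).
def Pre_extend_key (text : String) (key : String) : Prop :=
  text.length ≠ key.length ∧ key ≠ ""
instance (text : String) (key : String) : Decidable (Pre_extend_key text key) := by
  unfold Pre_extend_key; infer_instance
def pvWitness_extend_key : String × String := ("hello world", "abc")
def Spec_extend_key (text : String) (key : String) (out : String) : Prop := out = extend_key_alt text key
instance (text : String) (key : String) (out : String) : Decidable (Spec_extend_key text key out) := by unfold Spec_extend_key; infer_instance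

-- ===== CLAIM (what is proved, stated in full; the proofs are below) =====
def Claim_equal_extend_key : Prop := ∀ (text : String) (key : String), Dom_extend_key text key → Pre_extend_key text key → Spec_extend_key text key (extend_key text key)

-- ===== LEMMAS AND PROOFS =====

-- index j of the r-fold repetition of kl is kl[j % len kl]
lemma flatten_replicate_getElem? (kl : List Char) (r j : Nat) (h : j < r * kl.length) :
    ((List.replicate r kl).flatten)[j]? = kl[j % kl.length]? := by
  induction r generalizing j with
  | zero => omega
  | succ r ih =>
    rw [List.replicate_succ, List.flatten_cons]
    by_cases hj : j < kl.length
    · rw [List.getElem?_append_left hj, Nat.mod_eq_of_lt hj]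
    · have hmul : (r + 1) * kl.length = r * kl.length + kl.length := by ring
      rw [List.getElem?_append_right (by omega), ih (j - kl.length) (by omega),
        show j % kl.length = (j - kl.length) % kl.length from by
          conv_lhs => rw [show j = j - kl.length + kl.length from by omega]
          rw [Nat.add_mod_right]]

lemma flatten_replicate_length (kl : List Char) (r : Nat) :
    (List.replicate r kl).flatten.length = r * kl.length := by simp

-- any two sufficiently long repetitions of kl agree on their first n characters
lemma take_flatten_replicate_eq (kl : List Char) (n a b : Nat)
    (ha : n ≤ a * kl.length) (hb : n ≤ b * kl.length) :
    ((List.replicate a kl).flatten.take n) = ((List.replicate b kl).flatten.take n) := by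
  have key : ∀ (x y : Nat), x ≤ y → n ≤ x * kl.length →
      ((List.replicate y kl).flatten.take n) = ((List.replicate x kl).flatten.take n) := by
    intro x y hxy hx
    rw [show y = x + (y - x) from by omega, List.replicate_add, List.flatten_append,
      List.take_append_of_le_length (by rw [flatten_replicate_length]; exact hx)]
  rcases le_total a b with h | h
  · rw [key a b h ha]
  · rw [key b a h hb]

-- A's loop after N iterations is the first (len kl + N) chars of the (N+1)-fold repetition of kl
lemma loopA (kl : List Char) (hm : 0 < kl.length) (N : Nat) :
    (List.range N).foldl
      (fun k (j : Nat) => k ++ [((PySem.List.pyGet? k (PySem.Int.mod (j : Int) (k.length : Int))).getD ' ')]) kl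
    = (List.replicate (N + 1) kl).flatten.take (kl.length + N) := by
  induction N with
  | zero => simp
  | succ N ih =>
    rw [List.range_succ, List.foldl_append, ih]
    have hNle : N ≤ N * kl.length := Nat.le_mul_of_pos_right N hm
    have hs1 : (N + 1) * kl.length = N * kl.length + kl.length := by ring
    have hs2 : (N + 1 + 1) * kl.length = N * kl.length + kl.length + kl.length := by ring
    have hlen : ((List.replicate (N + 1) kl).flatten.take (kl.length + N)).length = kl.length + N := by
      rw [List.length_take, flatten_replicate_length]; omega
    simp only [List.foldl_cons, List.foldl_nil, hlen]
    have hmod : PySem.Int.mod (N : Int) ((kl.length + N : Nat) : Int) = ((N % (kl.length + N) : Nat) : Int) :=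
      PySem.Int.mod_natCast _ _
    rw [hmod, Nat.mod_eq_of_lt (by omega), PySem.List.pyGet?_natCast,
      List.getElem?_take_of_lt (by omega),
      flatten_replicate_getElem? kl (N + 1) N (by omega),
      List.getElem?_eq_getElem (Nat.mod_lt _ hm)]
    rw [show kl.length + (N + 1) = (kl.length + N) + 1 from rfl, List.take_add_one,
      flatten_replicate_getElem? kl (N + 1 + 1) (kl.length + N) (by omega),
      show (kl.length + N) % kl.length = N % kl.length from Nat.add_mod_left _ _,
      List.getElem?_eq_getElem (Nat.mod_lt _ hm),
      show List.replicate (N + 1 + 1) kl = List.replicate (N + 1) kl ++ List.replicate 1 kl from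
        List.replicate_add _ _ _,
      List.flatten_append,
      List.take_append_of_le_length (by rw [flatten_replicate_length]; omega)]
    simp

-- ===== VERDICT (by name: the statement is the Claim_ definition above) =====
theorem extend_key_spec : Claim_equal_extend_key := by
  intro text key _hdom hpre
  obtain ⟨hne, hkey⟩ := hpre
  unfold Spec_extend_key extend_key extend_key_alt
  have hklen : key.toList.length = key.length := String.length_toList
  have hm : 0 < key.length := by
    rcases Nat.eq_zero_or_pos key.length with h | h
    · exact absurd (String.ext (by simpa [List.length_eq_zero_iff] using hklen.trans h)) hkey
    · exact h
  by_cases hlt : text.length < key.length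
  · rw [if_neg (by rw [hklen]; omega), if_pos hlt]
    rw [PySem.List.pyRange_one,
      show (((text.length : Int) - (key.toList.length : Int)) - 0).toNat = 0 from by
        rw [hklen]; omega]
    simp
  · rw [if_neg (by rw [hklen]; omega), if_neg hlt]
    rw [PySem.List.pyRange_one,
      show (((text.length : Int) - (key.toList.length : Int)) - 0).toNat = text.length - key.length from by
        rw [hklen]; omega,
      List.foldl_map]
    simp only [zero_add]
    rw [loopA key.toList (by omega) (text.length - key.length), hklen,
      show key.length + (text.length - key.length) = text.length from by omega]
    -- B side: the repetition count covers text.length characters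
    have hNle : text.length - key.length ≤ (text.length - key.length) * key.length :=
      Nat.le_mul_of_pos_right _ hm
    have hs1 : (text.length - key.length + 1) * key.length
        = (text.length - key.length) * key.length + key.length := by ring
    have hmZ : (0 : Int) < (key.length : Int) := by exact_mod_cast hm
    have hdm := PySem.Int.floordiv_mul_add_mod (-(text.length : Int)) (key.length : Int)
    have hmod0 := PySem.Int.mod_nonneg (-(text.length : Int)) hmZ
    set d : Int := PySem.Int.floordiv (-(text.length : Int)) (key.length : Int) with hd
    have hge : (text.length : Int) ≤ (-d) * (key.length : Int) := by linarith
    have hdneg : 0 ≤ -d := by nlinarith [hmZ]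
    have hb : text.length ≤ (-d).toNat * key.length := by
      have : ((-d).toNat : Int) = -d := Int.toNat_of_nonneg hdneg
      exact_mod_cast this ▸ hge
    rw [take_flatten_replicate_eq key.toList text.length (text.length - key.length + 1) (-d).toNat
      (by rw [hklen]; omega) (by rw [hklen]; omega)]
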